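-- pv_equiv track=rewrite | github.com/HectUch/python-timeseries_MSA | msaAuxFunctions.py | findConsensus
-- ===== SOURCE A (Python) =====
-- def findConsensus(msa):
--     consensus = []
--     nonGaps = 0
--     for j in range(0,len(msa[0])):
--         for i in range(0,len(msa)):
--             if msa[i][j] != '-':
--                 nonGaps += 1
--         consensus.append(nonGaps)
--         nonGaps = 0
--     return consensus
-- ===== SOURCE B (Python) =====
-- def findConsensus(msa):
--     # Row-major sweep maintaining a running vector of per-column non-gap counts.
--     consensus = [0] * len(msa[0])
--     for i in range(len(msa)):
--         row = msa[i]
--         consensus = [consensus[j] + (1 if row[j] != '-' else 0) for j in range(len(consensus))]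
--     return consensus
-- ===== Notes on version B (the rewrite author's own statement) =====
-- stated objective: alternative
-- what changed: Replaces A's column-major double loop (one reset counter per column) with a single row-major sweep that maintains a full vector of running per-column counts, rebuilt per row by a comprehension.
import Mathlib
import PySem

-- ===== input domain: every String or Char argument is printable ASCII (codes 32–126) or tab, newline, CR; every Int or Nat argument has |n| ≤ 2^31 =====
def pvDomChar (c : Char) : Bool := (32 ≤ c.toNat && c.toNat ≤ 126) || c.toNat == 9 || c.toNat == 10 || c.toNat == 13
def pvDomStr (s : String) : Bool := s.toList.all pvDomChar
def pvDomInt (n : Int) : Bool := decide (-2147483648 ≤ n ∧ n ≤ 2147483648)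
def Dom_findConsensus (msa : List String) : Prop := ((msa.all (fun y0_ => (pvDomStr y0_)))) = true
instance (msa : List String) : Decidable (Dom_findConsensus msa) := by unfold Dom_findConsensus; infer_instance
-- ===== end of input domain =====

-- B replaces A's column-major double loop with a single row-major sweep maintaining a
-- running vector of per-column counts (alternative decomposition, same cost).

-- ===== PORT A =====
-- column-major: for each column j, scan all rows counting non-gaps, append, reset.
def findConsensus (msa : List String) : List Int :=
  let w : Nat := (msa.headD "").toList.length     -- len(msa[0]); out-of-range reads default to '-' but Pre_ rules them out
  (PySem.List.pyRange 0 (w : Int) 1).foldl (fun consensus j =>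
    let nonGaps : Int := msa.foldl (fun ng row =>
      if (PySem.Str.pyGet? row j).getD '-' ≠ '-' then ng + 1 else ng) 0
    consensus ++ [nonGaps]) []

-- ===== PORT B =====
-- row-major: start from [0]*len(msa[0]) and rebuild the running count vector per row.
def findConsensus_alt (msa : List String) : List Int :=
  let w : Nat := (msa.headD "").toList.length
  msa.foldl (fun consensus row =>
    (List.range consensus.length).map (fun j =>
      consensus.getD j 0 + if (PySem.Str.pyGet? row (j : Int)).getD '-' ≠ '-' then 1 else 0))
    (List.replicate w (0 : Int))

-- ===== PRECONDITION & SPEC =====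
-- Pre_ excludes exactly the inputs where Python A raises IndexError: empty msa, or a row
-- shorter than the first row (B raises IndexError on exactly the same inputs).
def Pre_findConsensus (msa : List String) : Prop :=
  msa ≠ [] ∧ ∀ s ∈ msa, (msa.headD "").toList.length ≤ s.toList.length
instance (msa : List String) : Decidable (Pre_findConsensus msa) := by
  unfold Pre_findConsensus; infer_instance
def pvWitness_findConsensus : List String := ["AB-", "A-B"]
def Spec_findConsensus (msa : List String) (out : List Int) : Prop := out = findConsensus_alt msa
instance (msa : List String) (out : List Int) : Decidable (Spec_findConsensus msa out) := by
  unfold Spec_findConsensus; infer_instance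

-- ===== CLAIM (what is proved, stated in full; the proofs are below) =====
def Claim_equal_findConsensus : Prop := ∀ (msa : List String), Dom_findConsensus msa → Pre_findConsensus msa → Spec_findConsensus msa (findConsensus msa)

-- ===== LEMMAS AND PROOFS =====

-- per-row 0/1 contribution of column j
def pvHit (row : String) (j : Nat) : Int :=
  if (PySem.Str.pyGet? row (j : Int)).getD '-' ≠ '-' then 1 else 0

-- total count of column j over the rows
def pvCnt (rows : List String) (j : Nat) : Int :=
  (rows.map (fun r => pvHit r j)).sum

theorem pvCnt_nil (j : Nat) : pvCnt [] j = 0 := rfl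

theorem pvCnt_cons (r : String) (rows : List String) (j : Nat) :
    pvCnt (r :: rows) j = pvHit r j + pvCnt rows j := by
  simp [pvCnt]

-- A's inner loop computes pvCnt
theorem pvInner_eq_cnt (msa : List String) (j : Nat) :
    msa.foldl (fun ng row =>
      if (PySem.Str.pyGet? row (j : Int)).getD '-' ≠ '-' then ng + 1 else ng) 0
    = pvCnt msa j := by
  have h : (fun (ng : Int) (row : String) =>
      if (PySem.Str.pyGet? row (j : Int)).getD '-' ≠ '-' then ng + 1 else ng)
      = (fun (ng : Int) (row : String) => ng + pvHit row j) := by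
    funext ng row; simp only [pvHit]; split <;> simp
  rw [h, PySem.List.foldl_add]
  simp [pvCnt]

-- B's fold invariant: starting from any vector of the form (range w).map f
theorem pvB_invariant (rows : List String) (w : Nat) (f : Nat → Int) :
    rows.foldl (fun consensus row =>
      (List.range consensus.length).map (fun j =>
        consensus.getD j 0 + if (PySem.Str.pyGet? row (j : Int)).getD '-' ≠ '-' then 1 else 0))
      ((List.range w).map f)
    = (List.range w).map (fun j => f j + pvCnt rows j) := by
  induction rows generalizing f with
  | nil => simp [pvCnt_nil]
  | cons r rows ih =>
      simp only [List.foldl_cons]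
      have hstep :
          (List.range ((List.range w).map f).length).map (fun j =>
            ((List.range w).map f).getD j 0 +
              if (PySem.Str.pyGet? r (j : Int)).getD '-' ≠ '-' then 1 else 0)
          = (List.range w).map (fun j => f j + pvHit r j) := by
        rw [List.length_map, List.length_range]
        refine List.map_congr_left ?_
        intro j hj
        have hjw : j < w := List.mem_range.mp hj
        rw [List.getD_eq_getElem?_getD, List.getElem?_map,
            List.getElem?_range hjw]
        simp [pvHit]
      rw [hstep, ih (fun j => f j + pvHit r j)]
      refine List.map_congr_left ?_
      intro j _
      rw [pvCnt_cons]; ring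

-- ===== VERDICT (by name: the statement is the Claim_ definition above) =====
theorem findConsensus_spec : Claim_equal_findConsensus := by
  intro msa _ _
  unfold Spec_findConsensus findConsensus findConsensus_alt
  simp only []
  set w : Nat := (msa.headD "").toList.length with hw
  -- A side: fold of appends over range = map of the inner counts
  rw [PySem.List.pyRange_zero_nat]
  rw [PySem.List.foldl_append_singleton_eq_map]
  -- B side: replicate as a map over range, then the invariant
  have hrep : List.replicate w (0 : Int) = (List.range w).map (fun _ => 0) := by
    simp [List.map_const']
  rw [hrep, pvB_invariant msa w (fun _ => 0)]
  simp only [List.nil_append, List.map_map]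
  refine List.map_congr_left ?_
  intro j _
  simp only [Function.comp]
  rw [pvInner_eq_cnt]
  ring
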